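-- pv_equiv track=rewrite | github.com/KendrickPC/dataStructuresAndAlgorithms | Chapter1/C-1.14.py | is_product_odd
-- ===== SOURCE A (Python) =====
-- def is_product_odd(numbers):
--   for i in range(len(numbers)):
--     for j in range(len(numbers)):
--       if i != j:
--         product = numbers[i] * numbers[j]
--         if product & 1:
--           return True
--           return False
-- ===== SOURCE B (Python) =====
-- def is_product_odd(numbers):
--     odd = 0
--     for n in numbers:
--         if n % 2 != 0:
--             odd += 1
--             if odd == 2:
--                 return True
-- ===== Notes on version B (the rewrite author's own statement) =====
-- stated objective: alternative
-- what changed: Replaced the nested index scan for a pair of distinct elements with odd product by a single pass that counts odd elements and returns True at the second odd one (a product of two distinct elements is odd iff both are odd).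
import Mathlib
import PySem

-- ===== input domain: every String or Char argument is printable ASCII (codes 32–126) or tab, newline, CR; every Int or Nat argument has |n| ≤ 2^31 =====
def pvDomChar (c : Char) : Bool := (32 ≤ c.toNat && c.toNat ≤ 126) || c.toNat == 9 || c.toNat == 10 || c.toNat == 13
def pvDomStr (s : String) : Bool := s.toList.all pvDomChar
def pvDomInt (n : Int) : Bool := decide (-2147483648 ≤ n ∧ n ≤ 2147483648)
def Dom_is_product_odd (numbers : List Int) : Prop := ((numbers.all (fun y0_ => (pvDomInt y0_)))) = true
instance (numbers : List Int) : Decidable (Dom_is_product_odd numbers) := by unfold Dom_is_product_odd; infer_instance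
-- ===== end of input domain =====

-- B replaces A's nested index scan by one pass counting odd elements, returning True at the second odd element (objective: alternative algorithm).

-- ===== PORT A =====
-- inner 'for j in range(len(numbers))' with early return True; the dead 'return False' after
-- 'return True' is unreachable and not ported
def pvAInner (numbers : List Int) (i : Int) : List Int → Option Bool
  | [] => none
  | j :: js =>
    if i ≠ j then
      match PySem.List.pyGet? numbers i, PySem.List.pyGet? numbers j with
      | some x, some y =>
        if PySem.Int.band (x * y) 1 ≠ 0 then some true else pvAInner numbers i js
      | _, _ => none   -- IndexError (never reached: i, j come from range(len(numbers)))
    else pvAInner numbers i js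

def pvAOuter (numbers : List Int) : List Int → Option Bool
  | [] => none
  | i :: is_ =>
    match pvAInner numbers i (PySem.List.pyRange 0 (PySem.List.len numbers) 1) with
    | some b => some b
    | none => pvAOuter numbers is_

def is_product_odd (numbers : List Int) : Option Bool :=
  pvAOuter numbers (PySem.List.pyRange 0 (PySem.List.len numbers) 1)

-- ===== PORT B =====
-- one pass; returns True as soon as a second odd element is seen, else falls off (None)
def pvBLoop : List Int → Int → Option Bool
  | [], _ => none
  | n :: ns, odd =>
    if PySem.Int.mod n 2 ≠ 0 then
      if odd + 1 = 2 then some true else pvBLoop ns (odd + 1)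
    else pvBLoop ns odd

def is_product_odd_alt (numbers : List Int) : Option Bool :=
  pvBLoop numbers 0

-- ===== PRECONDITION & SPEC =====
def Spec_is_product_odd (numbers : List Int) (out : Option Bool) : Prop := out = is_product_odd_alt numbers
instance (numbers : List Int) (out : Option Bool) : Decidable (Spec_is_product_odd numbers out) := by unfold Spec_is_product_odd; infer_instance

-- ===== CLAIM (what is proved, stated in full; the proofs are below) =====
def Claim_equal_is_product_odd : Prop := ∀ (numbers : List Int), Dom_is_product_odd numbers → Spec_is_product_odd numbers (is_product_odd numbers)

-- ===== LEMMAS AND PROOFS =====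
theorem two_le_countP_iff (p : Int → Bool) (l : List Int) :
    2 ≤ l.countP p ↔ ∃ a b : Nat, ∃ (ha : a < l.length) (hb : b < l.length),
      a ≠ b ∧ p l[a] ∧ p l[b] := by
  induction l with
  | nil => simp
  | cons x t ih =>
    rw [List.countP_cons]
    constructor
    · intro h
      by_cases hx : p x
      · simp [hx] at h
        rcases h with ⟨a, hmem, hpa⟩
        rcases List.mem_iff_getElem.mp hmem with ⟨k, hk, rfl⟩
        exact ⟨0, k+1, by simp, by simp; omega, by omega, by simpa using hx, by simpa using hpa⟩
      · simp [hx] at h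
        rcases ih.mp h with ⟨a, b, ha, hb, hab, hpa, hpb⟩
        exact ⟨a+1, b+1, by simp; omega, by simp; omega, by omega, by simpa using hpa, by simpa using hpb⟩
    · rintro ⟨a, b, ha, hb, hab, hpa, hpb⟩
      have key : ∀ a b : Nat, ∀ (ha : a < (x::t).length) (hb : b < (x::t).length),
          a ≠ b → p (x::t)[a] → p (x::t)[b] → a < b → 2 ≤ (if p x then 1 else 0) + t.countP p := by
        intro a b ha hb hab hpa hpb hlt
        match b, hb with
        | b'+1, hb =>
          have hb' : b' < t.length := by simpa using hb
          have hpb' : p t[b'] := by simpa using hpb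
          have h1 : 1 ≤ t.countP p := List.countP_pos_iff.mpr ⟨t[b'], List.getElem_mem hb', hpb'⟩
          match a, ha with
          | 0, _ =>
            have : p x := by simpa using hpa
            simp [this]; omega
          | a'+1, ha =>
            have ha' : a' < t.length := by simpa using ha
            have hpa' : p t[a'] := by simpa using hpa
            have h2 : 2 ≤ t.countP p := ih.mpr ⟨a', b', ha', hb', by omega, hpa', hpb'⟩
            split <;> omega
      rcases Nat.lt_or_ge a b with hlt | hge
      · have := key a b ha hb hab hpa hpb hlt; omega
      · have := key b a hb ha (by omega) hpb hpa (by omega); omega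

theorem band_odd_iff (x y : Int) : (PySem.Int.band (x*y) 1 ≠ 0) ↔ (x % 2 ≠ 0 ∧ y % 2 ≠ 0) := by
  rw [PySem.Int.band_one, PySem.Int.mod_eq_emod_of_pos (by omega)]
  rw [Int.mul_emod]
  rcases Int.emod_two_eq x with hx | hx <;> rcases Int.emod_two_eq y with hy | hy <;> simp [hx, hy]

theorem inner_eq (numbers : List Int) (i : Int) (x : Int)
    (hi : PySem.List.pyGet? numbers i = some x) :
    ∀ js : List Int, (∀ j ∈ js, ∃ y, PySem.List.pyGet? numbers j = some y) →
    pvAInner numbers i js =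
      if (∃ j ∈ js, i ≠ j ∧ x % 2 ≠ 0 ∧ (PySem.List.pyGet? numbers j).getD 0 % 2 ≠ 0)
      then some true else none := by
  intro js hjs
  induction js with
  | nil => simp [pvAInner]
  | cons j js ihj =>
    rcases hjs j (by simp) with ⟨y, hy⟩
    have hrest : ∀ j ∈ js, ∃ y, PySem.List.pyGet? numbers j = some y :=
      fun j hm => hjs j (List.mem_cons_of_mem _ hm)
    have hsplit : (∃ j' ∈ j :: js, i ≠ j' ∧ x % 2 ≠ 0 ∧ (PySem.List.pyGet? numbers j').getD 0 % 2 ≠ 0)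
        ↔ (i ≠ j ∧ x % 2 ≠ 0 ∧ y % 2 ≠ 0) ∨
          (∃ j' ∈ js, i ≠ j' ∧ x % 2 ≠ 0 ∧ (PySem.List.pyGet? numbers j').getD 0 % 2 ≠ 0) := by
      rw [List.exists_mem_cons_iff, hy]; rfl
    by_cases hij : i = j
    · rw [pvAInner, if_neg (by simp [hij]), ihj hrest]
      congr 1
      rw [eq_iff_iff, hsplit]
      simp [hij]
    · rw [pvAInner]
      simp only [ne_eq, hij, not_false_eq_true, if_true, hi, hy]
      by_cases hodd : PySem.Int.band (x * y) 1 ≠ 0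
      · rcases (band_odd_iff x y).mp hodd with ⟨h1, h2⟩
        rw [if_pos hodd, if_pos (hsplit.mpr (Or.inl ⟨hij, h1, h2⟩))]
      · rw [if_neg hodd, ihj hrest]
        have hno : ¬(i ≠ j ∧ x % 2 ≠ 0 ∧ y % 2 ≠ 0) := by
          intro ⟨_, h1, h2⟩; exact hodd ((band_odd_iff x y).mpr ⟨h1, h2⟩)
        congr 1
        rw [eq_iff_iff, hsplit]
        simp only [hno, false_or]

theorem range_get (numbers : List Int) :
    ∀ j ∈ PySem.List.pyRange 0 (PySem.List.len numbers) 1, ∃ y, PySem.List.pyGet? numbers j = some y := by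
  intro j hj
  rw [PySem.List.mem_pyRange_one] at hj
  rw [PySem.List.len_eq] at hj
  exact ⟨numbers[j.toNat], PySem.List.pyGet?_eq_some_getElem numbers hj.1 hj.2⟩

theorem outer_eq (numbers : List Int) :
    ∀ is_ : List Int, (∀ i ∈ is_, ∃ x, PySem.List.pyGet? numbers i = some x) →
    pvAOuter numbers is_ =
      if (∃ i ∈ is_, ∃ j ∈ PySem.List.pyRange 0 (PySem.List.len numbers) 1,
            i ≠ j ∧ (PySem.List.pyGet? numbers i).getD 0 % 2 ≠ 0 ∧
            (PySem.List.pyGet? numbers j).getD 0 % 2 ≠ 0)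
      then some true else none := by
  intro is_ his
  induction is_ with
  | nil => simp [pvAOuter]
  | cons i is' ih =>
    rcases his i (by simp) with ⟨x, hx⟩
    have hrest : ∀ i ∈ is', ∃ x, PySem.List.pyGet? numbers i = some x :=
      fun i hm => his i (List.mem_cons_of_mem _ hm)
    rw [pvAOuter, inner_eq numbers i x hx _ (range_get numbers)]
    have hgx : (PySem.List.pyGet? numbers i).getD 0 = x := by rw [hx]; rfl
    by_cases hQ : ∃ j ∈ PySem.List.pyRange 0 (PySem.List.len numbers) 1,
        i ≠ j ∧ x % 2 ≠ 0 ∧ (PySem.List.pyGet? numbers j).getD 0 % 2 ≠ 0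
    · rw [if_pos hQ]
      rcases hQ with ⟨j, hj, h1, h2, h3⟩
      rw [if_pos ⟨i, by simp, j, hj, h1, by rw [hgx]; exact h2, h3⟩]
    · rw [if_neg hQ]
      simp only []
      rw [ih hrest]
      congr 1
      rw [eq_iff_iff, List.exists_mem_cons_iff]
      constructor
      · intro h; exact Or.inr h
      · rintro (⟨j, hj, h1, h2, h3⟩ | h)
        · exact absurd ⟨j, hj, h1, by rw [hgx] at h2; exact h2, h3⟩ hQ
        · exact h

theorem countP_char (numbers : List Int) :
    (2 ≤ numbers.countP (fun n => decide (n % 2 ≠ 0))) ↔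
    (∃ i ∈ PySem.List.pyRange 0 (PySem.List.len numbers) 1,
       ∃ j ∈ PySem.List.pyRange 0 (PySem.List.len numbers) 1,
         i ≠ j ∧ (PySem.List.pyGet? numbers i).getD 0 % 2 ≠ 0 ∧
         (PySem.List.pyGet? numbers j).getD 0 % 2 ≠ 0) := by
  rw [two_le_countP_iff]
  constructor
  · rintro ⟨a, b, ha, hb, hab, hpa, hpb⟩
    refine ⟨(a : Int), ?_, (b : Int), ?_, ?_, ?_, ?_⟩
    · rw [PySem.List.mem_pyRange_one]
      exact ⟨Int.natCast_nonneg a, by rw [PySem.List.len_eq]; exact_mod_cast ha⟩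
    · rw [PySem.List.mem_pyRange_one]
      exact ⟨Int.natCast_nonneg b, by rw [PySem.List.len_eq]; exact_mod_cast hb⟩
    · exact_mod_cast fun h => hab (by exact_mod_cast h)
    · rw [PySem.List.pyGet?_natCast, List.getElem?_eq_getElem ha]; simpa using hpa
    · rw [PySem.List.pyGet?_natCast, List.getElem?_eq_getElem hb]; simpa using hpb
  · rintro ⟨i, hi, j, hj, hij, h2, h3⟩
    rw [PySem.List.mem_pyRange_one] at hi hj
    simp only [PySem.List.len_eq] at hi hj
    refine ⟨i.toNat, j.toNat, by omega, by omega, by omega, ?_, ?_⟩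
    · rw [PySem.List.pyGet?_eq_some_getElem numbers hi.1 (by omega)] at h2; simpa using h2
    · rw [PySem.List.pyGet?_eq_some_getElem numbers hj.1 (by omega)] at h3; simpa using h3

theorem pvBLoop_char (l : List Int) :
    ∀ odd : Int, 0 ≤ odd → odd ≤ 1 →
    pvBLoop l odd =
      if 2 ≤ odd + (l.countP (fun n => decide (n % 2 ≠ 0)) : Int) then some true else none := by
  induction l with
  | nil => intro odd h0 h1; rw [pvBLoop, if_neg (by simp; omega)]
  | cons n ns ih =>
    intro odd h0 h1
    rw [pvBLoop, List.countP_cons]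
    by_cases hp : PySem.Int.mod n 2 ≠ 0
    · have hp' : decide (n % 2 ≠ 0) = true := by
        rw [PySem.Int.mod_eq_emod_of_pos (show (0:Int) < 2 by omega)] at hp
        simpa using hp
      rw [if_pos hp]
      by_cases h2 : odd + 1 = 2
      · rw [if_pos h2, if_pos (by simp only [hp', if_true]; push_cast; omega)]
      · rw [if_neg h2, ih (odd + 1) (by omega) (by omega)]
        congr 1
        rw [eq_iff_iff]
        simp only [hp', if_true]; push_cast; omega
    · have hp' : decide (n % 2 ≠ 0) = false := by
        rw [PySem.Int.mod_eq_emod_of_pos (show (0:Int) < 2 by omega)] at hp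
        simpa using hp
      rw [if_neg hp, ih odd h0 h1]
      congr 1
      rw [eq_iff_iff]
      simp only [hp', Bool.false_eq_true, if_false, Nat.add_zero]

theorem alt_char (numbers : List Int) :
    is_product_odd_alt numbers =
      if 2 ≤ numbers.countP (fun n => decide (n % 2 ≠ 0)) then some true else none := by
  unfold is_product_odd_alt
  rw [pvBLoop_char numbers 0 (by omega) (by omega)]
  by_cases h : 2 ≤ numbers.countP (fun n => decide (n % 2 ≠ 0))
  · rw [if_pos (by omega), if_pos h]
  · rw [if_neg (by omega), if_neg h]

theorem is_product_odd_eq_alt (numbers : List Int) : is_product_odd numbers = is_product_odd_alt numbers := by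
  unfold is_product_odd
  rw [outer_eq numbers _ (range_get numbers), alt_char]
  congr 1
  rw [eq_iff_iff, countP_char]

-- ===== VERDICT (by name: the statement is the Claim_ definition above) =====
theorem is_product_odd_spec : Claim_equal_is_product_odd := by
  intro numbers _
  unfold Spec_is_product_odd
  exact is_product_odd_eq_alt numbers
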